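-- pv_equiv track=rewrite | github.com/madfam-org/selva-office | packages/permissions/selva_permissions/context_signature.py | _glob_bucket
-- ===== SOURCE A (Python) =====
-- def _glob_bucket(paths: list[str] | None) -> str:
--     """Summarise a changed-file list as a coarse bucket.
--
--     We don't want per-file shards, but we do want to distinguish "migration
--     touched" from "tests only" — those have very different blast radiuses.
--     """
--     if not paths:
--         return "none"
--     joined = " ".join(paths).lower()
--     has_migration = "migrations/" in joined or "alembic/" in joined
--     has_prod_code = any(not p.startswith(("tests/", "test/", "docs/")) for p in paths)
--     has_tests_only = all(p.startswith(("tests/", "test/")) for p in paths)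
--     if has_migration:
--         return "migration"
--     if has_tests_only:
--         return "tests_only"
--     if has_prod_code:
--         return "prod_code"
--     return "other"
-- ===== SOURCE B (Python) =====
-- def _kind(p: str) -> int:
--     """Severity rank of one path: 0 = test file, 1 = docs file, 2 = production code."""
--     if p.startswith(("tests/", "test/")):
--         return 0
--     if p.startswith("docs/"):
--         return 1
--     return 2
--
--
-- def _glob_bucket(paths: "list[str] | None") -> str:
--     """Summarise a changed-file list as a coarse bucket.
--
--     Per-path severity rank reduced with max, plus an early return for
--     migrations: rank 0 everywhere = tests_only, rank 2 anywhere = prod_code,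
--     otherwise (tests + docs mix) = other.
--     """
--     if not paths:
--         return "none"
--     if any("migrations/" in p.lower() or "alembic/" in p.lower() for p in paths):
--         return "migration"
--     return ("tests_only", "other", "prod_code")[max(map(_kind, paths))]
-- ===== Notes on version B (the rewrite author's own statement) =====
-- stated objective: alternative
-- what changed: Replaces A's three boolean flags (joined-string substring scan, any(), all()) and its if-cascade with a per-path 3-level severity rank, a max() reduction, and a result-table lookup, with migration as an early-returning per-path any().
import Mathlib
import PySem

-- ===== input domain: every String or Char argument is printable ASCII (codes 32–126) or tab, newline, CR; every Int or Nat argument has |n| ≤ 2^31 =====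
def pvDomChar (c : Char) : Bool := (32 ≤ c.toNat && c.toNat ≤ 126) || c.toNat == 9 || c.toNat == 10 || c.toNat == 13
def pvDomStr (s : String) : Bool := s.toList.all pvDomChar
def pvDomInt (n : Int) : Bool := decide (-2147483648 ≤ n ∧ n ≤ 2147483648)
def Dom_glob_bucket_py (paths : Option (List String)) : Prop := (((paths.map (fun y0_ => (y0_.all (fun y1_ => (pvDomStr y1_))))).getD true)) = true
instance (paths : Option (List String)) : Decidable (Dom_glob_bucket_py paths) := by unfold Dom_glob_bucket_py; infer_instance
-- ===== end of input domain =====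

-- B replaces A's three boolean flags and if-cascade by a per-path severity rank,
-- a max reduction and a table lookup (alternative decomposition, same value).

-- ===== PORT A =====
def glob_bucket_py (paths : Option (List String)) : String :=
  match paths with
  | none => "none"
  | some ps =>
    if ps.isEmpty then "none"
    else
      let joined := PySem.Str.lower (PySem.Str.join " " ps)
      let has_migration := PySem.Str.isIn "migrations/" joined || PySem.Str.isIn "alembic/" joined
      let has_prod_code := ps.any (fun p =>
        !(PySem.Str.startswith p "tests/" || PySem.Str.startswith p "test/" || PySem.Str.startswith p "docs/"))
      let has_tests_only := ps.all (fun p =>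
        PySem.Str.startswith p "tests/" || PySem.Str.startswith p "test/")
      if has_migration then "migration"
      else if has_tests_only then "tests_only"
      else if has_prod_code then "prod_code"
      else "other"

-- ===== PORT B =====
-- severity rank of one path: 0 = test file, 1 = docs file, 2 = production code
def pvKind (p : String) : Nat :=
  if PySem.Str.startswith p "tests/" || PySem.Str.startswith p "test/" then 0
  else if PySem.Str.startswith p "docs/" then 1
  else 2

def glob_bucket_py_alt (paths : Option (List String)) : String :=
  match paths with
  | none => "none"
  | some ps =>
    if ps.isEmpty then "none"
    else if ps.any (fun p =>
        PySem.Str.isIn "migrations/" (PySem.Str.lower p) || PySem.Str.isIn "alembic/" (PySem.Str.lower p)) then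
      "migration"
    else
      -- max(map(_kind, paths)) over the nonempty list, then a table lookup
      ["tests_only", "other", "prod_code"].getD ((ps.map pvKind).foldl max 0) ""

-- ===== PRECONDITION & SPEC =====
def Spec_glob_bucket_py (paths : Option (List String)) (out : String) : Prop := out = glob_bucket_py_alt paths
instance (paths : Option (List String)) (out : String) : Decidable (Spec_glob_bucket_py paths out) := by unfold Spec_glob_bucket_py; infer_instance

-- ===== CLAIM (what is proved, stated in full; the proofs are below) =====
def Claim_equal_glob_bucket_py : Prop := ∀ (paths : Option (List String)), Dom_glob_bucket_py paths → Spec_glob_bucket_py paths (glob_bucket_py paths)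

-- ===== LEMMAS AND PROOFS =====

-- an occurrence of `sub` (not containing c) in `a ++ c :: b` lies entirely in `a` or in `b`
lemma infix_append_cons_iff {α : Type} (c : α) (sub a b : List α) (hc : c ∉ sub) :
    sub <:+: a ++ c :: b ↔ sub <:+: a ∨ sub <:+: b := by
  constructor
  · rintro ⟨s, t, hst⟩
    have hlen := congrArg List.length hst
    simp at hlen
    by_cases h1 : s.length + sub.length ≤ a.length
    · left
      have hpre : s ++ sub <+: a ++ c :: b := ⟨t, by simpa [List.append_assoc] using hst⟩
      have hpa : s ++ sub <+: a :=
        List.prefix_of_prefix_length_le hpre (List.prefix_append a (c :: b)) (by simp; omega)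
      exact List.IsInfix.trans ⟨s, [], by simp⟩ hpa.isInfix
    · by_cases h2 : a.length < s.length
      · right
        have hsuf : sub ++ t <:+ a ++ c :: b := ⟨s, by simpa [List.append_assoc] using hst⟩
        have hsb : sub ++ t <:+ b :=
          List.suffix_of_suffix_length_le hsuf ⟨a ++ [c], by simp⟩ (by simp; omega)
        exact List.IsInfix.trans ⟨[], t, by simp⟩ hsb.isInfix
      · exfalso
        push Not at h1 h2
        apply hc
        have hi : a.length < (a ++ c :: b).length := by simp
        have hi2 : a.length < (s ++ (sub ++ t)).length := by simp; omega
        have hval : (a ++ c :: b)[a.length]'hi = c := by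
          rw [List.getElem_append_right (le_refl a.length)]
          simp
        have heq : (s ++ (sub ++ t))[a.length]'hi2 = (a ++ c :: b)[a.length]'hi :=
          List.getElem_of_eq (by rw [← hst, List.append_assoc]) _
        have hval2 : (s ++ (sub ++ t))[a.length]'hi2 = sub[a.length - s.length]'(by omega) := by
          rw [List.getElem_append_right h2]
          rw [List.getElem_append_left (by omega)]
        rw [heq, hval] at hval2
        exact hval2 ▸ List.getElem_mem _
  · rintro (h | h)
    · exact h.trans ⟨[], c :: b, by simp⟩
    · exact h.trans ⟨a ++ [c], [], by simp⟩

-- a space-free pattern occurs in the " "-joined list iff it occurs in one of the pieces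
lemma infix_join_space_iff (sub : List Char) (hc : ' ' ∉ sub)
    (x : List Char) (rest : List (List Char)) :
    sub <:+: PySem.Chars.join [' '] (x :: rest) ↔ ∃ p ∈ x :: rest, sub <:+: p := by
  induction rest generalizing x with
  | nil => simp [pysem]
  | cons y r ih =>
    rw [PySem.Chars.join_cons_cons]
    have he : x ++ [' '] ++ PySem.Chars.join [' '] (y :: r)
        = x ++ ' ' :: PySem.Chars.join [' '] (y :: r) := by simp
    rw [he, infix_append_cons_iff ' ' sub _ _ hc, ih y]
    simp

-- lower distributes over the " "-join (lower is charwise and fixes ' ')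
lemma lower_join_space (l : List (List Char)) :
    PySem.Chars.lower (PySem.Chars.join [' '] l) = PySem.Chars.join [' '] (l.map PySem.Chars.lower) := by
  induction l with
  | nil => rfl
  | cons x r ih =>
    cases r with
    | nil => simp [PySem.Chars.join_singleton]
    | cons y r' =>
      rw [PySem.Chars.join_cons_cons, List.map_cons, List.map_cons, PySem.Chars.join_cons_cons,
        ← List.map_cons, ← ih]
      show List.map _ _ = _
      simp [PySem.Chars.lower, List.map_append]
      rfl

-- A's lowered-joined-string substring test equals B's per-path test, for a nonempty list
lemma isIn_joined_eq (sub : String) (hc : ' ' ∉ sub.toList) (q : String) (r : List String) :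
    PySem.Str.isIn sub (PySem.Str.lower (PySem.Str.join " " (q :: r)))
      = (q :: r).any (fun p => PySem.Str.isIn sub (PySem.Str.lower p)) := by
  have hjl : (PySem.Str.lower (PySem.Str.join " " (q :: r))).toList
      = PySem.Chars.join [' '] (PySem.Chars.lower q.toList :: r.map (PySem.Chars.lower ∘ String.toList)) := by
    have : (PySem.Str.lower (PySem.Str.join " " (q :: r))).toList
        = PySem.Chars.lower (PySem.Chars.join [' '] ((q :: r).map String.toList)) := by simp [pysem]
    rw [this, lower_join_space, List.map_map, List.map_cons]
    rfl
  rcases h : (q :: r).any (fun p => PySem.Str.isIn sub (PySem.Str.lower p)) with _ | _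
  · rw [PySem.Str.isIn_eq, PySem.Chars.isIn_eq_false_iff, hjl,
      infix_join_space_iff sub.toList hc]
    simp only [List.any_eq_false] at h
    rintro ⟨p, hp, hinf⟩
    rcases List.mem_cons.mp hp with rfl | hp'
    · have hq := h q (by simp)
      rw [PySem.Str.isIn_eq] at hq
      exact hq (by rw [PySem.Chars.isIn_iff_infix]; simpa [pysem] using hinf)
    · obtain ⟨p0, hp0, rfl⟩ := List.mem_map.mp hp'
      have hq := h p0 (by simp [hp0])
      rw [PySem.Str.isIn_eq] at hq
      exact hq (by rw [PySem.Chars.isIn_iff_infix]; simpa [pysem] using hinf)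
  · rw [PySem.Str.isIn_eq, PySem.Chars.isIn_iff_infix, hjl,
      infix_join_space_iff sub.toList hc]
    simp only [List.any_eq_true] at h
    obtain ⟨p, hp, hsub⟩ := h
    rw [PySem.Str.isIn_eq, PySem.Chars.isIn_iff_infix] at hsub
    rcases List.mem_cons.mp hp with rfl | hp'
    · exact ⟨PySem.Chars.lower p.toList, by simp, by simpa [pysem] using hsub⟩
    · refine ⟨PySem.Chars.lower p.toList, ?_, by simpa [pysem] using hsub⟩
      exact List.mem_cons_of_mem _ (List.mem_map.mpr ⟨p, hp', rfl⟩)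

-- any distributes over the per-path disjunction
lemma any_or_eq (ps : List String) (f g : String → Bool) :
    ps.any (fun p => f p || g p) = (ps.any f || ps.any g) := by
  induction ps with
  | nil => rfl
  | cons q r ih =>
    simp only [List.any_cons, ih]
    cases f q <;> cases g q <;> simp

-- pvKind is bounded by 2
lemma pvKind_le (p : String) : pvKind p ≤ 2 := by
  unfold pvKind; split_ifs <;> omega

-- rank 0 means A's tests-only predicate holds at p
lemma pvKind_eq_zero (p : String) :
    pvKind p = 0 ↔ (PySem.Str.startswith p "tests/" || PySem.Str.startswith p "test/") = true := by
  unfold pvKind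
  cases h1 : (PySem.Str.startswith p "tests/" || PySem.Str.startswith p "test/") <;>
    cases h2 : PySem.Str.startswith p "docs/" <;> simp_all

-- rank 2 means A's prod-code predicate holds at p
lemma pvKind_eq_two (p : String) :
    pvKind p = 2 ↔ (!(PySem.Str.startswith p "tests/" || PySem.Str.startswith p "test/" || PySem.Str.startswith p "docs/")) = true := by
  unfold pvKind
  cases h1 : (PySem.Str.startswith p "tests/" || PySem.Str.startswith p "test/") <;>
    cases h2 : PySem.Str.startswith p "docs/" <;> simp_all

-- the max-fold over the per-path ranks, characterised by A's all/any tests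
lemma fold_max_spec (ps : List String) (a : Nat) (ha : a ≤ 2) :
    let r := (ps.map pvKind).foldl max a
    r ≤ 2 ∧
    (r = 0 ↔ a = 0 ∧ ps.all (fun p => PySem.Str.startswith p "tests/" || PySem.Str.startswith p "test/") = true) ∧
    (r = 2 ↔ a = 2 ∨ ps.any (fun p =>
      !(PySem.Str.startswith p "tests/" || PySem.Str.startswith p "test/" || PySem.Str.startswith p "docs/")) = true) := by
  induction ps generalizing a with
  | nil => simpa using ha
  | cons q rest ih =>
    simp only [List.map_cons, List.foldl_cons, List.all_cons, List.any_cons]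
    obtain ⟨i1, i2, i3⟩ := ih (max a (pvKind q)) (by have := pvKind_le q; omega)
    refine ⟨i1, ?_, ?_⟩
    · rw [i2, Bool.and_eq_true, ← pvKind_eq_zero]
      have hq := pvKind_le q
      have hiff : max a (pvKind q) = 0 ↔ a = 0 ∧ pvKind q = 0 := by omega
      tauto
    · rw [i3, Bool.or_eq_true, ← pvKind_eq_two]
      have hq := pvKind_le q
      have hiff : max a (pvKind q) = 2 ↔ a = 2 ∨ pvKind q = 2 := by omega
      tauto

-- ===== VERDICT (by name: the statement is the Claim_ definition above) =====
theorem glob_bucket_py_spec : Claim_equal_glob_bucket_py := by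
  intro paths _
  unfold Spec_glob_bucket_py glob_bucket_py glob_bucket_py_alt
  match paths with
  | none => rfl
  | some [] => rfl
  | some (q :: rest) =>
    simp only [List.isEmpty_cons, Bool.false_eq_true, if_false]
    rw [show ((q :: rest).any (fun p =>
        PySem.Str.isIn "migrations/" (PySem.Str.lower p) || PySem.Str.isIn "alembic/" (PySem.Str.lower p)))
      = (PySem.Str.isIn "migrations/" (PySem.Str.lower (PySem.Str.join " " (q :: rest)))
         || PySem.Str.isIn "alembic/" (PySem.Str.lower (PySem.Str.join " " (q :: rest)))) by
      rw [any_or_eq, ← isIn_joined_eq "migrations/" (by decide) q rest,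
          ← isIn_joined_eq "alembic/" (by decide) q rest]]
    by_cases hm : (PySem.Str.isIn "migrations/" (PySem.Str.lower (PySem.Str.join " " (q :: rest)))
         || PySem.Str.isIn "alembic/" (PySem.Str.lower (PySem.Str.join " " (q :: rest)))) = true
    · rw [if_pos hm, if_pos hm]
    · rw [if_neg hm, if_neg hm]
      obtain ⟨hr2, h0, h2⟩ := fold_max_spec (q :: rest) 0 (by omega)
      by_cases hT : ((q :: rest).all (fun p =>
          PySem.Str.startswith p "tests/" || PySem.Str.startswith p "test/")) = true
      · have hr : ((q :: rest).map pvKind).foldl max 0 = 0 := h0.mpr ⟨rfl, hT⟩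
        rw [if_pos hT, hr]
        decide
      · have hr0 : ((q :: rest).map pvKind).foldl max 0 ≠ 0 := fun h => hT (h0.mp h).2
        rw [if_neg hT]
        by_cases hP : ((q :: rest).any (fun p =>
            !(PySem.Str.startswith p "tests/" || PySem.Str.startswith p "test/" || PySem.Str.startswith p "docs/"))) = true
        · have hr : ((q :: rest).map pvKind).foldl max 0 = 2 := h2.mpr (Or.inr hP)
          rw [if_pos hP, hr]
          decide
        · have hrne : ((q :: rest).map pvKind).foldl max 0 ≠ 2 := by
            intro h
            rcases h2.mp h with h | h
            · omega
            · exact hP h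
          have hr : ((q :: rest).map pvKind).foldl max 0 = 1 := by omega
          rw [if_neg hP, hr]
          decide
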